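-- pv_equiv track=rewrite | github.com/RevShellX/KaliOSINT | social_media_osint.py | validate_bitcoin_address
-- ===== SOURCE A (Python) =====
-- def validate_bitcoin_address(address):
--     """Basic Bitcoin address validation"""
--     # Basic format validation
--     if len(address) < 26 or len(address) > 35:
--         return False
--
--     # Check for valid characters
--     valid_chars = "123456789ABCDEFGHJKLMNPQRSTUVWXYZabcdefghijkmnopqrstuvwxyz"
--     for char in address:
--         if char not in valid_chars:
--             return False
--
--     return True
-- ===== SOURCE B (Python) =====
-- import re
--
-- _B58_RE = re.compile(r'[123456789ABCDEFGHJKLMNPQRSTUVWXYZabcdefghijkmnopqrstuvwxyz]{26,35}')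
--
-- def validate_bitcoin_address(address):
--     """Basic Bitcoin address validation"""
--     return bool(_B58_RE.fullmatch(address))
-- ===== Notes on version B (the rewrite author's own statement) =====
-- stated objective: idiomatic
-- what changed: Replaced the explicit length guard and per-character early-return loop with a single precompiled re.fullmatch over the Base58 character class bounded to 26-35 repetitions.
import Mathlib
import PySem

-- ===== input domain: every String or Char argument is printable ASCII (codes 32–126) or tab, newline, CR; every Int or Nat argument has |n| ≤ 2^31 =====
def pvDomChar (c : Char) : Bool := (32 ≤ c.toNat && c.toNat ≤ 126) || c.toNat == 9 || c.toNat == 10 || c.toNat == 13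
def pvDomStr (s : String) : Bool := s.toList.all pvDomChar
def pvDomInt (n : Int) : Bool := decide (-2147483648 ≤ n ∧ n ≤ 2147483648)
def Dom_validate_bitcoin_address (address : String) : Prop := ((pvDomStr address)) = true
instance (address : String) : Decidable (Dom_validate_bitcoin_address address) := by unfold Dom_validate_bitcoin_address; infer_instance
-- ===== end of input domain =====

-- B replaces A's explicit length guard and per-character early-return loop by a single
-- regex fullmatch over the Base58 character class bounded to 26–35 repetitions (idiomatic).

-- ===== PORT A =====
def pvValidChars : String := "123456789ABCDEFGHJKLMNPQRSTUVWXYZabcdefghijkmnopqrstuvwxyz"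

-- the 'for char in address: if char not in valid_chars: return False' loop, early return and all
def pvLoopA : List Char → Bool
  | [] => true
  | c :: rest => if (pvValidChars.toList.contains c) = false then false else pvLoopA rest

def validate_bitcoin_address (address : String) : Bool :=
  if address.toList.length < 26 ∨ address.toList.length > 35 then false
  else pvLoopA address.toList

-- ===== PORT B =====
-- semantics of the regex character class [123456789ABCDEFGHJKLMNPQRSTUVWXYZabcdefghijkmnopqrstuvwxyz]
-- (digits 1-9, upper case without I and O, lower case without l)
def pvB58Class (c : Char) : Bool :=
  (('1' ≤ c && c ≤ '9') || ('A' ≤ c && c ≤ 'Z') || ('a' ≤ c && c ≤ 'z'))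
  && !(c == 'I' || c == 'O' || c == 'l')

-- bool(fullmatch(class{26,35}, address)): the whole string is 26–35 chars of the class
def validate_bitcoin_address_alt (address : String) : Bool :=
  decide (26 ≤ address.toList.length ∧ address.toList.length ≤ 35)
  && address.toList.all pvB58Class

-- ===== PRECONDITION & SPEC =====
def Spec_validate_bitcoin_address (address : String) (out : Bool) : Prop := out = validate_bitcoin_address_alt address
instance (address : String) (out : Bool) : Decidable (Spec_validate_bitcoin_address address out) := by unfold Spec_validate_bitcoin_address; infer_instance

-- ===== CLAIM (what is proved, stated in full; the proofs are below) =====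
def Claim_equal_validate_bitcoin_address : Prop := ∀ (address : String), Dom_validate_bitcoin_address address → Spec_validate_bitcoin_address address (validate_bitcoin_address address)

-- ===== LEMMAS AND PROOFS =====
theorem pv_class_eq (c : Char) : pvValidChars.toList.contains c = pvB58Class c := by
  rw [Bool.eq_iff_iff]
  simp [pvValidChars, pvB58Class, Char.le_def, Char.ext_iff, UInt32.le_iff_toNat_le,
    UInt32.ext_iff]
  omega

theorem pv_loopA_eq_all (l : List Char) : pvLoopA l = l.all pvB58Class := by
  induction l with
  | nil => rfl
  | cons c rest ih =>
    simp only [pvLoopA, List.all_cons, pv_class_eq, ih]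
    cases pvB58Class c <;> simp

-- ===== VERDICT (by name: the statement is the Claim_ definition above) =====
theorem validate_bitcoin_address_spec : Claim_equal_validate_bitcoin_address := by
  intro address _
  unfold Spec_validate_bitcoin_address validate_bitcoin_address validate_bitcoin_address_alt
  rw [pv_loopA_eq_all]
  split_ifs with h
  · have hn : ¬(26 ≤ address.toList.length ∧ address.toList.length ≤ 35) := by omega
    rw [decide_eq_false hn, Bool.false_and]
  · have hy : 26 ≤ address.toList.length ∧ address.toList.length ≤ 35 := by omega
    rw [decide_eq_true hy, Bool.true_and]
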